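-- pv_equiv track=rewrite | github.com/goshtdev/upbge | doc/python_api/sphinx_stub_gen.py | resolve_dotted_refs
-- ===== SOURCE A (Python) =====
-- def is_word_char(c: str) -> bool:
--     """Return True if *c* is alphanumeric or underscore (equivalent to ``\\w``)."""
--     return c.isalnum() or c == "_"
--
-- def resolve_dotted_refs(
--     text: str,
--     class_locations: dict[str, str],
--     current_module: str,
--     imports: set[tuple[str, str]],
-- ) -> str:
--     """Resolve dotted FQN references like ``bpy.types.Scene`` to ``Scene``."""
--     parts: list[str] = []
--     pos = 0
--     span_start = 0  # Start of current non-matching span.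
--     length = len(text)
--     while pos < length:
--         # Look for a lowercase letter at a word boundary.
--         if text[pos].islower() and (pos == 0 or not is_word_char(text[pos - 1])):
--             # Read dot-separated identifiers.
--             start = pos
--             while True:
--                 ident_start = pos
--                 while pos < length and is_word_char(text[pos]):
--                     pos += 1
--                 ident = text[ident_start:pos]
--                 if not ident:
--                     break
--                 if pos < length and text[pos] == ".":
--                     pos += 1  # skip dot, continue reading
--                 else:
--                     break
--             fqn = text[start:pos]
--             # Check if the final component starts with uppercase and length >= 2.
--             dot_idx = fqn.rfind(".")
--             if dot_idx != -1:
--                 final = fqn[dot_idx + 1:]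
--                 if len(final) >= 2 and final[0].isupper() and final in class_locations:
--                     module = class_locations[final]
--                     if module != current_module:
--                         imports.add((module, final))
--                     parts.append(text[span_start:start])
--                     parts.append(final)
--                     span_start = pos
--                     continue
--             # No resolution, the span continues through this identifier.
--         else:
--             pos += 1
--     parts.append(text[span_start:pos])
--     return "".join(parts)
-- ===== SOURCE B (Python) =====
-- def is_word_char(c: str) -> bool:
--     return c.isalnum() or c == "_"
--
--
-- def _take_chain(s: str) -> str:
--     """Greedily consume a dot-separated identifier chain at the start of *s*
--     (s[0] is a lowercase letter).  A dot is consumed together with the chain;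
--     the chain ends after a dot that is not followed by a word character."""
--     chain = []
--     it = s
--     while True:
--         i = 0
--         while i < len(it) and is_word_char(it[i]):
--             i += 1
--         if i == 0:
--             break
--         chain.append(it[:i])
--         it = it[i:]
--         if it.startswith("."):
--             chain.append(".")
--             it = it[1:]
--         else:
--             break
--     return "".join(chain)
--
--
-- def resolve_dotted_refs(
--     text: str,
--     class_locations: dict[str, str],
--     current_module: str,
--     imports: set[tuple[str, str]],
-- ) -> str:
--     out = []
--     prev_word = False
--     rest = text
--     while rest:
--         c = rest[0]
--         if c.islower() and not prev_word:
--             chain = _take_chain(rest)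
--             rest = rest[len(chain):]
--             prev_word = is_word_char(chain[-1])
--             head, sep, final = chain.rpartition(".")
--             if sep and len(final) >= 2 and final[0].isupper() and final in class_locations:
--                 module = class_locations[final]
--                 if module != current_module:
--                     imports.add((module, final))
--                 out.append(final)
--             else:
--                 out.append(chain)
--         else:
--             out.append(c)
--             prev_word = is_word_char(c)
--             rest = rest[1:]
--     return "".join(out)
-- ===== Notes on version B (the rewrite author's own statement) =====
-- stated objective: alternative
-- what changed: Replaces A's index-based scanner (pos/span_start bookkeeping over the string with nested index loops and slice re-reads) by a single functional pass that carries a previous-char-is-word flag, greedily consumes each whole dotted chain as a list, and resolves it rpartition-style; both mutate `imports` identically.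
import Mathlib
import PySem

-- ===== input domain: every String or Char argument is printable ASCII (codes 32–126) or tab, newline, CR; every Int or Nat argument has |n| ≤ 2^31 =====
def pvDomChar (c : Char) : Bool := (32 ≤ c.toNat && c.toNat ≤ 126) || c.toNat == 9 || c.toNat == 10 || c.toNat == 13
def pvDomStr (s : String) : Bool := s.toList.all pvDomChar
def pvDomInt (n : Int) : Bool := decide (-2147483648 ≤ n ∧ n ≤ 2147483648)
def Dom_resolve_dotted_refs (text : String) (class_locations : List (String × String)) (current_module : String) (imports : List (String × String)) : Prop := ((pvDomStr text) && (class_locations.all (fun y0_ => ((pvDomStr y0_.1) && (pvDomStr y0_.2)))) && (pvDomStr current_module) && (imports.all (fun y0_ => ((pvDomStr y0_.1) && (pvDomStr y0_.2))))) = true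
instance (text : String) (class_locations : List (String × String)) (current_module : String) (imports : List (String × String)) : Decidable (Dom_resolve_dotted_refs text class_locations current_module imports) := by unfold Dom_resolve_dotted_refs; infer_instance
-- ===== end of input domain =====

-- B replaces A's index/span_start scanner by a single functional pass that consumes whole
-- dotted chains and resolves them rpartition-style (objective: alternative, same O(n) cost).
-- Both Pythons mutate `imports` identically; the equivalence proved here is about the RETURN value.

-- ===== PORT A =====
-- A is ported over `List Char` (text.toList). A's pos/span_start indices only ever grow from 0,
-- so text[pos] becomes getD pos and a slice text[a:b] (0 ≤ a ≤ b) becomes (take b).drop a — exact there.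
def is_word_char (c : Char) : Bool := PySem.Chars.isalnum c || c == '_'

-- inner `while pos < length and is_word_char(text[pos]): pos += 1`
def advWordA (chars : List Char) (pos : Nat) : Nat :=
  if h : pos < chars.length ∧ is_word_char (chars.getD pos ' ') = true then
    advWordA chars (pos + 1)
  else pos
termination_by chars.length - pos
decreasing_by omega

-- cited by the termination proofs of readChainA / loopA
theorem advWordA_ge (chars : List Char) (pos : Nat) : pos ≤ advWordA chars pos := by
  fun_induction advWordA chars pos with
  | case1 pos h ih => omega
  | case2 pos h => omega

theorem advWordA_gt (chars : List Char) (pos : Nat) (h1 : pos < chars.length)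
    (h2 : is_word_char (chars.getD pos ' ') = true) : pos < advWordA chars pos := by
  rw [advWordA, dif_pos ⟨h1, h2⟩]
  have := advWordA_ge chars (pos + 1)
  omega

-- A's `while True:` chain reader; returns the final pos
def readChainA (chars : List Char) (pos : Nat) : Nat :=
  let p2 := advWordA chars pos
  if p2 = pos then pos
  else if h : p2 < chars.length ∧ (chars.getD p2 ' ' == '.') = true then
    readChainA chars (p2 + 1)
  else p2
termination_by chars.length - pos
decreasing_by
  have := advWordA_ge chars pos
  omega

theorem readChainA_ge (chars : List Char) (pos : Nat) : pos ≤ readChainA chars pos := by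
  fun_induction readChainA chars pos with
  | case1 pos h => omega
  | case2 pos h hd ih => have := advWordA_ge chars pos; omega
  | case3 pos h hd => have := advWordA_ge chars pos; omega

theorem readChainA_gt (chars : List Char) (pos : Nat) (h1 : pos < chars.length)
    (h2 : is_word_char (chars.getD pos ' ') = true) : pos < readChainA chars pos := by
  rw [readChainA]
  have hadv := advWordA_gt chars pos h1 h2
  split
  · omega
  · split
    · have := readChainA_ge chars (advWordA chars pos + 1)
      omega
    · exact hadv

theorem lower_word (c : Char) (h : PySem.Chars.islower c = true) : is_word_char c = true := by
  simp [is_word_char, PySem.Chars.isalnum, PySem.Chars.isalpha, h]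

-- hand port of fqn.rfind("."): the HIGHEST index of '.', none for -1 (exact)
def rfindDotA : List Char → Option Nat
  | [] => none
  | c :: rest =>
    match rfindDotA rest with
    | some i => some (i + 1)
    | none => if c == '.' then some 0 else none

-- A's `while pos < length:` loop; parts/span_start as in A, joined at the end
def loopA (chars : List Char) (cl : PySem.Dict String String) (pos span_start : Nat)
    (parts : List (List Char)) : List Char :=
  if hlen : pos < chars.length then
    if hg : (PySem.Chars.islower (chars.getD pos ' ')
        && (pos == 0 || !is_word_char (chars.getD (pos - 1) ' '))) = true then
      let start := pos
      let pos2 := readChainA chars pos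
      let fqn := (chars.take pos2).drop start
      match rfindDotA fqn with
      | some di =>
        let final := fqn.drop (di + 1)
        if decide (2 ≤ final.length) && PySem.Chars.isupper (final.getD 0 ' ')
            && cl.contains (String.mk final) then
          loopA chars cl pos2 pos2 (parts ++ [(chars.take start).drop span_start, final])
        else
          loopA chars cl pos2 span_start parts
      | none => loopA chars cl pos2 span_start parts
    else
      loopA chars cl (pos + 1) span_start parts
  else
    (parts ++ [(chars.take pos).drop span_start]).flatten
termination_by chars.length - pos
decreasing_by
  all_goals
    first
    | (simp only [Bool.and_eq_true] at hg
       have := readChainA_gt chars pos hlen (lower_word _ hg.1)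
       omega)
    | omega

def resolve_dotted_refs (text : String) (class_locations : List (String × String)) (current_module : String) (imports : List (String × String)) : String :=
  String.mk (loopA text.toList (PySem.Dict.ofList class_locations) 0 0 [])

-- ===== PORT B =====
-- port of _take_chain (B builds the chain as a list and slices the rest off by its length)
def takeChainB (l : List Char) : List Char :=
  let ident := l.takeWhile is_word_char
  if ident.isEmpty then []
  else
    match hm : l.dropWhile is_word_char with
    | c :: r' => if c == '.' then ident ++ '.' :: takeChainB r' else ident
    | [] => ident
termination_by l.length
decreasing_by
  have hlen := congrArg List.length (List.takeWhile_append_dropWhile (p := is_word_char) (l := l))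
  rw [hm] at hlen
  simp at hlen ⊢
  rename_i hne _
  simp [List.isEmpty_iff, ← List.length_eq_zero_iff] at hne
  omega

-- the chain.rpartition(".") resolution step of B
def resolveChainB (cl : PySem.Dict String String) (chain : List Char) : List Char :=
  let final := (chain.reverse.takeWhile (fun c => !(c == '.'))).reverse
  if decide (final.length ≠ chain.length) && decide (2 ≤ final.length)
      && PySem.Chars.isupper (final.getD 0 ' ') && cl.contains (String.mk final) then
    final
  else chain

theorem takeChainB_length_pos (c : Char) (rest : List Char) (hw : is_word_char c = true) :
    0 < (takeChainB (c :: rest)).length := by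
  rw [takeChainB]
  simp [hw]
  split <;> (try split) <;> simp

-- B's main pass: prev_word flag + rest suffix
def goB (cl : PySem.Dict String String) (prev : Bool) (l : List Char) : List Char :=
  match l with
  | [] => []
  | c :: rest =>
    if hg : (PySem.Chars.islower c && !prev) = true then
      let chain := takeChainB (c :: rest)
      resolveChainB cl chain
        ++ goB cl (is_word_char (chain.getLastD ' ')) ((c :: rest).drop chain.length)
    else
      c :: goB cl (is_word_char c) rest
termination_by l.length
decreasing_by
  · simp only [Bool.and_eq_true] at hg
    have := takeChainB_length_pos c rest (lower_word c hg.1)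
    simp
    omega
  · simp

def resolve_dotted_refs_alt (text : String) (class_locations : List (String × String)) (current_module : String) (imports : List (String × String)) : String :=
  String.mk (goB (PySem.Dict.ofList class_locations) false text.toList)

-- ===== PRECONDITION & SPEC =====
def Spec_resolve_dotted_refs (text : String) (class_locations : List (String × String)) (current_module : String) (imports : List (String × String)) (out : String) : Prop := out = resolve_dotted_refs_alt text class_locations current_module imports
instance (text : String) (class_locations : List (String × String)) (current_module : String) (imports : List (String × String)) (out : String) : Decidable (Spec_resolve_dotted_refs text class_locations current_module imports out) := by unfold Spec_resolve_dotted_refs; infer_instance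

-- ===== CLAIM (what is proved, stated in full; the proofs are below) =====
def Claim_equal_resolve_dotted_refs : Prop := ∀ (text : String) (class_locations : List (String × String)) (current_module : String) (imports : List (String × String)), Dom_resolve_dotted_refs text class_locations current_module imports → Spec_resolve_dotted_refs text class_locations current_module imports (resolve_dotted_refs text class_locations current_module imports)

-- ===== LEMMAS AND PROOFS =====

theorem dropWhile_eq_drop_len (p : Char → Bool) (l : List Char) :
    l.dropWhile p = l.drop (l.takeWhile p).length := by
  induction l with
  | nil => rfl
  | cons c t ih => by_cases h : p c <;> simp [h, ih]

theorem advWordA_eq (chars : List Char) (pos : Nat) :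
    advWordA chars pos = pos + ((chars.drop pos).takeWhile is_word_char).length := by
  fun_induction advWordA chars pos with
  | case1 pos h ih =>
    obtain ⟨h1, h2⟩ := h
    rw [List.drop_eq_getElem_cons h1, List.takeWhile_cons]
    rw [List.getD_eq_getElem chars ' ' h1] at h2
    simp [h2]
    omega
  | case2 pos h =>
    by_cases h1 : pos < chars.length
    · have h2 : is_word_char (chars.getD pos ' ') ≠ true := fun hh => h ⟨h1, hh⟩
      rw [List.drop_eq_getElem_cons h1, List.takeWhile_cons]
      rw [List.getD_eq_getElem chars ' ' h1] at h2
      simp [h2]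
    · rw [List.drop_eq_nil_iff.mpr (by omega)]
      simp

theorem takeChainB_prefix (l : List Char) : takeChainB l <+: l := by
  fun_induction takeChainB l with
  | case1 l ident h => exact List.nil_prefix
  | case2 l ident hemp c r' hm hdot ih =>
    obtain ⟨t, ht⟩ := ih
    refine ⟨t, ?_⟩
    rw [List.append_assoc, List.cons_append, ht, ← (beq_iff_eq.mp hdot), ← hm,
      List.takeWhile_append_dropWhile]
  | case3 l ident hemp c r' hm hdot =>
    conv_rhs => rw [← List.takeWhile_append_dropWhile (p := is_word_char) (l := l)]
    exact ⟨l.dropWhile is_word_char, rfl⟩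
  | case4 l ident hemp hm =>
    conv_rhs => rw [← List.takeWhile_append_dropWhile (p := is_word_char) (l := l)]
    exact ⟨l.dropWhile is_word_char, rfl⟩

theorem readChainA_eq (chars : List Char) (pos : Nat) :
    readChainA chars pos = pos + (takeChainB (chars.drop pos)).length := by
  fun_induction readChainA chars pos with
  | case1 pos p2 heq =>
    have hq : p2 = advWordA chars pos := rfl
    rw [hq, advWordA_eq] at heq
    rw [takeChainB]
    have : ((chars.drop pos).takeWhile is_word_char).isEmpty = true := by
      simp [← List.length_eq_zero_iff]; omega
    simp [this]
  | case2 pos p2 hne h ih =>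
    have hq : p2 = advWordA chars pos := rfl
    obtain ⟨hlt, hdot⟩ := h
    rw [hq] at hne hlt hdot ih ⊢
    rw [advWordA_eq] at hne hlt hdot ih ⊢
    rw [ih]
    have hdw : (chars.drop pos).dropWhile is_word_char
        = chars.drop (pos + ((chars.drop pos).takeWhile is_word_char).length) := by
      rw [dropWhile_eq_drop_len, List.drop_drop]
    conv_rhs => rw [takeChainB]
    have hemp : ((chars.drop pos).takeWhile is_word_char).isEmpty = false := by
      simp [← List.length_eq_zero_iff]; omega
    rw [hemp]
    simp only [Bool.false_eq_true, if_false]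
    rw [hdw, List.drop_eq_getElem_cons hlt]
    rw [List.getD_eq_getElem chars ' ' hlt] at hdot
    simp only [hdot]
    simp
    omega
  | case3 pos p2 hne h =>
    have hq : p2 = advWordA chars pos := rfl
    rw [hq] at hne h ⊢
    rw [advWordA_eq] at hne h ⊢
    conv_rhs => rw [takeChainB]
    have hemp : ((chars.drop pos).takeWhile is_word_char).isEmpty = false := by
      simp [← List.length_eq_zero_iff]; omega
    rw [hemp]
    simp only [Bool.false_eq_true, if_false]
    have hdw : (chars.drop pos).dropWhile is_word_char
        = chars.drop (pos + ((chars.drop pos).takeWhile is_word_char).length) := by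
      rw [dropWhile_eq_drop_len, List.drop_drop]
    rw [hdw]
    clear hq
    by_cases hlt : pos + ((chars.drop pos).takeWhile is_word_char).length < chars.length
    · have hdot : (chars.getD (pos + ((chars.drop pos).takeWhile is_word_char).length) ' ' == '.') ≠ true :=
        fun hh => h ⟨hlt, hh⟩
      rw [List.drop_eq_getElem_cons hlt]
      rw [List.getD_eq_getElem chars ' ' hlt] at hdot
      simp only [Bool.not_eq_true] at hdot
      simp [hdot]
    · have hnil : chars.drop (pos + ((chars.drop pos).takeWhile is_word_char).length) = [] :=
        List.drop_eq_nil_iff.mpr (by omega)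
      rw [hnil]

theorem slice_split (l : List Char) (a b c : Nat) (hab : a ≤ b) (hbc : b ≤ c) :
    (l.take c).drop a = (l.take b).drop a ++ (l.take c).drop b := by
  rw [List.drop_take, List.drop_take, List.drop_take]
  rw [show c - a = (b - a) + (c - b) by omega, List.take_add, List.drop_drop]
  rw [show a + (b - a) = b by omega]

-- the dot-free suffix used by resolveChainB (B's rpartition)
def finalSuffix (l : List Char) : List Char := (l.reverse.takeWhile (fun c => !(c == '.'))).reverse

theorem rfindDotA_append (xs : List Char) (x : Char) :
    rfindDotA (xs ++ [x]) = if x == '.' then some xs.length else rfindDotA xs := by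
  induction xs with
  | nil => simp [rfindDotA]
  | cons c t ih =>
    simp only [List.cons_append, rfindDotA, ih]
    by_cases hx : (x == '.') = true
    · simp [hx]
    · simp only [hx, Bool.false_eq_true, if_false]

theorem finalSuffix_append (xs : List Char) (x : Char) :
    finalSuffix (xs ++ [x]) = if x == '.' then [] else finalSuffix xs ++ [x] := by
  simp only [finalSuffix, List.reverse_append, List.reverse_cons, List.reverse_nil,
    List.nil_append, List.cons_append, List.takeWhile_cons]
  by_cases hx : (x == '.') = true
  · simp [hx]
  · simp [hx]

theorem rfind_finalSuffix (l : List Char) :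
    (rfindDotA l = none ∧ finalSuffix l = l)
      ∨ ∃ di, rfindDotA l = some di ∧ di < l.length ∧ finalSuffix l = l.drop (di + 1) := by
  induction l using List.reverseRecOn with
  | nil => left; exact ⟨rfl, rfl⟩
  | append_singleton xs x ih =>
    rw [rfindDotA_append, finalSuffix_append]
    by_cases hx : (x == '.') = true
    · right
      refine ⟨xs.length, ?_, ?_, ?_⟩
      · simp [hx]
      · simp
      · simp [hx]
    · rcases ih with ⟨h1, h2⟩ | ⟨di, h1, h2, h3⟩
      · left
        simp [hx, h1, h2]
      · right
        refine ⟨di, ?_, ?_, ?_⟩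
        · simp [hx, h1]
        · simp; omega
        · simp only [hx, Bool.false_eq_true, if_false, h3]
          rw [List.drop_append_of_le_length (by omega)]

theorem goB_nil (cl : PySem.Dict String String) (prev : Bool) : goB cl prev [] = [] := by
  rw [goB]

theorem goB_cons (cl : PySem.Dict String String) (prev : Bool) (c : Char) (rest : List Char) :
    goB cl prev (c :: rest)
      = if (PySem.Chars.islower c && !prev) = true then
          resolveChainB cl (takeChainB (c :: rest))
            ++ goB cl (is_word_char ((takeChainB (c :: rest)).getLastD ' '))
                ((c :: rest).drop (takeChainB (c :: rest)).length)
        else c :: goB cl (is_word_char c) rest := by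
  rw [goB]
  split <;> rfl

theorem resolveChainB_of_none (cl : PySem.Dict String String) (chain : List Char)
    (h : finalSuffix chain = chain) : resolveChainB cl chain = chain := by
  unfold resolveChainB
  rw [show (chain.reverse.takeWhile (fun c => !(c == '.'))).reverse = finalSuffix chain from rfl, h]
  simp

theorem resolveChainB_of_some (cl : PySem.Dict String String) (chain final : List Char)
    (hlen : final.length < chain.length) (h : finalSuffix chain = final) :
    resolveChainB cl chain
      = if decide (2 ≤ final.length) && PySem.Chars.isupper (final.getD 0 ' ')
            && cl.contains (String.mk final) then final else chain := by
  unfold resolveChainB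
  rw [show (chain.reverse.takeWhile (fun c => !(c == '.'))).reverse = finalSuffix chain from rfl, h]
  simp [show final.length ≠ chain.length from by omega]

theorem loopA_term (chars : List Char) (cl : PySem.Dict String String) (span : Nat)
    (parts : List (List Char)) :
    loopA chars cl chars.length span parts
      = parts.flatten ++ ((chars.take chars.length).drop span)
          ++ goB cl (decide (chars.length ≠ 0) && is_word_char (chars.getD (chars.length - 1) ' '))
              (chars.drop chars.length) := by
  rw [loopA, dif_neg (by omega), List.drop_length, goB_nil]
  simp

theorem loopA_eq_goB (chars : List Char) (cl : PySem.Dict String String) :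
    ∀ (n pos span : Nat) (parts : List (List Char)),
      chars.length - pos ≤ n → span ≤ pos → pos ≤ chars.length →
      loopA chars cl pos span parts
        = parts.flatten ++ ((chars.take pos).drop span)
            ++ goB cl (decide (pos ≠ 0) && is_word_char (chars.getD (pos - 1) ' '))
                (chars.drop pos) := by
  intro n
  induction n with
  | zero =>
    intro pos span parts h0 hsp hpl
    have hp : pos = chars.length := by omega
    subst hp
    exact loopA_term chars cl span parts
  | succ n ih =>
    intro pos span parts h0 hsp hpl
    by_cases hlen : pos < chars.length
    case neg =>
      have hp : pos = chars.length := by omega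
      subst hp
      exact loopA_term chars cl span parts
    case pos =>
    have hget : chars.getD pos ' ' = chars[pos] := List.getD_eq_getElem chars ' ' hlen
    have hdropc : chars.drop pos = chars[pos] :: chars.drop (pos + 1) := List.drop_eq_getElem_cons hlen
    rw [loopA, dif_pos hlen, hdropc, goB_cons]
    have hguard : (pos == 0 || !is_word_char (chars.getD (pos - 1) ' '))
        = !(decide (pos ≠ 0) && is_word_char (chars.getD (pos - 1) ' ')) := by
      cases pos <;> simp
    rw [hget, hguard]
    by_cases hg : (PySem.Chars.islower chars[pos]
        && !(decide (pos ≠ 0) && is_word_char (chars.getD (pos - 1) ' '))) = true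
    case neg =>
      rw [dif_neg hg, if_neg hg]
      rw [ih (pos + 1) span parts (by omega) (by omega) (by omega)]
      have hsl : (chars.take (pos + 1)).drop span = (chars.take pos).drop span ++ [chars[pos]] := by
        rw [slice_split chars span pos (pos + 1) hsp (by omega)]
        congr 1
        have h1 : pos + 1 - pos = 1 := by omega
        rw [List.drop_take, h1, hdropc]
        rfl
      have hprev1 : (decide (pos + 1 ≠ 0) && is_word_char (chars.getD (pos + 1 - 1) ' '))
          = is_word_char chars[pos] := by
        simp [List.getElem?_eq_getElem hlen]
      rw [hsl, hprev1]
      simp [List.append_assoc]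
    case pos =>
    rw [dif_pos hg, if_pos hg]
    have hgl : PySem.Chars.islower chars[pos] = true := by
      simp only [Bool.and_eq_true] at hg
      exact hg.1
    have hw : is_word_char chars[pos] = true := lower_word _ hgl
    rw [← hdropc]
    obtain ⟨t, ht⟩ := takeChainB_prefix (chars.drop pos)
    set chain := takeChainB (chars.drop pos) with hchain_def
    have hlenpos : 0 < chain.length := by
      rw [hchain_def, hdropc]
      exact takeChainB_length_pos _ _ hw
    have hklen : chain.length ≤ chars.length - pos := by
      have h1 := congrArg List.length ht
      simp at h1
      omega
    have hchain : readChainA chars pos = pos + chain.length := readChainA_eq chars pos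
    have hfqn : (chars.take (pos + chain.length)).drop pos = chain := by
      rw [List.drop_take, show pos + chain.length - pos = chain.length from by omega, ← ht,
        List.take_left]
    have hdrop2 : (chars.drop pos).drop chain.length = chars.drop (pos + chain.length) := by
      rw [List.drop_drop]
    have hne : chain ≠ [] := by
      intro hh
      rw [hh] at hlenpos
      simp at hlenpos
    have hprev2 : (decide (pos + chain.length ≠ 0)
          && is_word_char (chars.getD (pos + chain.length - 1) ' '))
        = is_word_char (chain.getLastD ' ') := by
      have h1 : decide (pos + chain.length ≠ 0) = true := by
        simp [hne]
      have hlt2 : pos + chain.length - 1 < chars.length := by omega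
      have h2 : chars.getD (pos + chain.length - 1) ' ' = chain.getLastD ' ' := by
        have h3 : pos + chain.length - 1 = pos + (chain.length - 1) := by omega
        simp only [List.getD, List.getLastD_eq_getLast?, List.getLast?_eq_getElem?]
        congr 1
        rw [h3, ← List.getElem?_drop, ← ht, List.getElem?_append_left (by omega)]
      rw [h1, h2, Bool.true_and]
    have hassemble : (chars.take (pos + chain.length)).drop span
        = (chars.take pos).drop span ++ chain := by
      rw [slice_split chars span pos (pos + chain.length) hsp (by omega), hfqn]
    have hempty : (chars.take (pos + chain.length)).drop (pos + chain.length) = [] := by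
      rw [List.drop_take]
      simp
    rw [hchain]
    dsimp only
    rw [hfqn, hdrop2]
    rcases rfind_finalSuffix chain with ⟨hnone, hfs⟩ | ⟨di, hsome, hdi, hfs⟩
    · rw [hnone]
      dsimp only
      rw [resolveChainB_of_none cl _ hfs]
      rw [ih (pos + chain.length) span parts (by omega) (by omega) (by omega)]
      rw [hprev2, hassemble]
      simp [List.append_assoc]
    · rw [hsome]
      dsimp only
      have hfl : (chain.drop (di + 1)).length < chain.length := by
        simp
        omega
      rw [resolveChainB_of_some cl chain (chain.drop (di + 1)) hfl hfs]
      by_cases hc : (decide (2 ≤ (chain.drop (di + 1)).length)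
          && PySem.Chars.isupper ((chain.drop (di + 1)).getD 0 ' ')
          && cl.contains (String.mk (chain.drop (di + 1)))) = true
      · rw [if_pos hc, if_pos hc]
        rw [ih (pos + chain.length) (pos + chain.length)
          (parts ++ [(chars.take pos).drop span, chain.drop (di + 1)]) (by omega) (by omega)
          (by omega)]
        rw [hprev2, hempty]
        simp [List.flatten_append, List.append_assoc]
      · rw [if_neg hc, if_neg hc]
        rw [ih (pos + chain.length) span parts (by omega) (by omega) (by omega)]
        rw [hprev2, hassemble]
        simp [List.append_assoc]

-- ===== VERDICT (by name: the statement is the Claim_ definition above) =====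

-- ===== VERDICT (by name: the statement is the Claim_ definition above) =====
theorem resolve_dotted_refs_spec : Claim_equal_resolve_dotted_refs := by
  intro text cl cm imp _
  unfold Spec_resolve_dotted_refs resolve_dotted_refs resolve_dotted_refs_alt
  have h := loopA_eq_goB text.toList (PySem.Dict.ofList cl) text.toList.length 0 0 [] (by omega) (by omega) (by omega)
  simp at h
  rw [h]
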